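-- pv_equiv track=rewrite | github.com/4GeeksAcademy/Place-Between | src/api/routes.py | _calc_streak
-- ===== SOURCE A (Python) =====
-- def _calc_streak(flags_by_date):
--     """
--     flags_by_date: lista bool en orden cronológico (True = día consistente)
--     current: racha desde el final
--     best: máxima racha
--     """
--     best = 0
--     tmp = 0
--     for f in flags_by_date:
--         if f:
--             tmp += 1
--             best = max(best, tmp)
--         else:
--             tmp = 0
--
--     cur = 0
--     for f in reversed(flags_by_date):
--         if f:
--             cur += 1
--         else:
--             break
--
--     return cur, best
-- ===== SOURCE B (Python) =====
-- def _calc_streak(flags_by_date):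
--     # run-length-encode the flags once, then reduce over the runs
--     runs = []
--     for f in flags_by_date:
--         if runs and runs[-1][0] == f:
--             runs[-1] = (f, runs[-1][1] + 1)
--         else:
--             runs.append((f, 1))
--     best = max((n for k, n in runs if k), default=0)
--     cur = runs[-1][1] if runs and runs[-1][0] else 0
--     return cur, best
-- ===== Notes on version B (the rewrite author's own statement) =====
-- stated objective: alternative
-- what changed: B run-length-encodes the flags in one pass and obtains best as the max length of a True run and cur as the length of the last run (if True), replacing A's two explicit counter loops (one forward, one over reversed with break).
import Mathlib
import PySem

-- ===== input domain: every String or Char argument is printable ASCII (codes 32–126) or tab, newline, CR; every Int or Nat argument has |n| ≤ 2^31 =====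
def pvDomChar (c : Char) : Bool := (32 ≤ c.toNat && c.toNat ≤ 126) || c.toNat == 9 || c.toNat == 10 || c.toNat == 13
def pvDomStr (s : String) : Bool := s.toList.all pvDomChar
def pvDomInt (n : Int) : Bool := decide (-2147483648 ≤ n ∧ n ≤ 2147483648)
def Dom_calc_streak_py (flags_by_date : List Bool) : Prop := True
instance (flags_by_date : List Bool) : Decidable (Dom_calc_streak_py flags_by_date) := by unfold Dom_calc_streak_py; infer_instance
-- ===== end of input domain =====

-- B replaces A's two counter loops by one run-length-encoding pass plus reductions over the runs (alternative decomposition, same cost).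


-- ===== PORT A =====
-- body of A's first loop: tmp += 1; best = max(best, tmp) / tmp = 0
def pvStepA (s : Int × Int) (f : Bool) : Int × Int :=
  if f then (max s.1 (s.2 + 1), s.2 + 1) else (s.1, 0)

-- A's second loop: 'for f in reversed(...): if f: cur += 1 else: break' = count of leading Trues of the reversed list
def pvCountLead : List Bool → Int
  | [] => 0
  | f :: rest => if f then pvCountLead rest + 1 else 0

def calc_streak_py (flags_by_date : List Bool) : Int × Int :=
  let bt := flags_by_date.foldl pvStepA (0, 0)
  let cur := pvCountLead flags_by_date.reverse
  (cur, bt.1)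

-- ===== PORT B =====
-- B's RLE loop appends/updates at the end of 'runs'; ported as a foldl over a reversed accumulator, reversed at the end
def pvRunStep (acc : List (Bool × Int)) (f : Bool) : List (Bool × Int) :=
  match acc with
  | (g, n) :: tl => if g == f then (f, n + 1) :: tl else (f, 1) :: (g, n) :: tl
  | [] => [(f, 1)]

-- max((n for k, n in runs if k), default=0); exact since every run length is ≥ 1 > 0
def pvBestStep (b : Int) (kn : Bool × Int) : Int :=
  if kn.1 then max b kn.2 else b

def calc_streak_py_alt (flags_by_date : List Bool) : Int × Int :=
  let runs := (flags_by_date.foldl pvRunStep []).reverse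
  let best := runs.foldl pvBestStep 0
  let cur := match runs.getLast? with
    | some (true, n) => n
    | _ => 0
  (cur, best)

-- ===== PRECONDITION & SPEC =====
def Spec_calc_streak_py (flags_by_date : List Bool) (out : Int × Int) : Prop := out = calc_streak_py_alt flags_by_date
instance (flags_by_date : List Bool) (out : Int × Int) : Decidable (Spec_calc_streak_py flags_by_date out) := by unfold Spec_calc_streak_py; infer_instance

-- ===== CLAIM (what is proved, stated in full; the proofs are below) =====
def Claim_equal_calc_streak_py : Prop := ∀ (flags_by_date : List Bool), Dom_calc_streak_py flags_by_date → Spec_calc_streak_py flags_by_date (calc_streak_py flags_by_date)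

-- ===== LEMMAS AND PROOFS =====

-- best over a list of runs (the fold B performs)
def pvM (rs : List (Bool × Int)) : Int := rs.foldl pvBestStep 0

-- length of the run at the head of the (reversed) run accumulator, if it is a True run
def pvHeadT : List (Bool × Int) → Int
  | (true, n) :: _ => n
  | _ => 0

theorem pvFoldl_bestStep_max (rs : List (Bool × Int)) : ∀ (a b : Int),
    rs.foldl pvBestStep (max a b) = max a (rs.foldl pvBestStep b) := by
  induction rs with
  | nil => intro a b; simp
  | cons r tl ih =>
    intro a b
    simp only [List.foldl_cons, pvBestStep]
    by_cases h : r.1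
    · simp [h, max_assoc, ih]
    · simp [h, ih]

theorem pvM_cons (r : (Bool × Int)) (rs : List (Bool × Int)) :
    pvM (r :: rs) = if r.1 then max r.2 (pvM rs) else pvM rs := by
  by_cases h : r.1
  · simp only [pvM, List.foldl_cons, pvBestStep, h, if_true]
    rw [max_comm, pvFoldl_bestStep_max]
  · simp [pvM, pvBestStep, h]

theorem pvM_reverse (rs : List (Bool × Int)) : pvM rs.reverse = pvM rs := by
  induction rs with
  | nil => rfl
  | cons r tl ih =>
    rw [List.reverse_cons, pvM, List.foldl_append, pvM_cons]
    show pvBestStep (pvM tl.reverse) r = _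
    rw [ih, pvBestStep]
    by_cases h : r.1 <;> simp [h, max_comm]

-- coupling: A's fold state is exactly (best-of-runs, head-True-run-length) of B's run accumulator
theorem pvCouple (l : List Bool) : ∀ (acc : List (Bool × Int)),
    l.foldl pvStepA (pvM acc, pvHeadT acc) =
      (pvM (l.foldl pvRunStep acc), pvHeadT (l.foldl pvRunStep acc)) := by
  induction l with
  | nil => intro acc; rfl
  | cons f l' ih =>
    intro acc
    have key : pvStepA (pvM acc, pvHeadT acc) f =
        (pvM (pvRunStep acc f), pvHeadT (pvRunStep acc f)) := by
      match acc with
      | [] =>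
        cases f <;> simp [pvStepA, pvRunStep, pvM, pvHeadT, pvBestStep]
      | (g, n) :: tl =>
        cases g <;> cases f <;>
          simp only [pvRunStep, pvStepA, pvHeadT, pvM_cons, beq_iff_eq,
            Bool.false_eq_true, if_true, if_false] <;>
          simp [pvM_cons, max_def] <;> split_ifs <;> omega
    rw [List.foldl_cons, List.foldl_cons, key, ih]

-- counting leading Trues across an append
theorem pvCountLead_append (a b : List Bool) :
    pvCountLead (a ++ b) = if a.all (fun x => x) then (a.length : Int) + pvCountLead b else pvCountLead a := by
  induction a with
  | nil => simp [pvCountLead]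
  | cons f a' ih =>
    cases f
    · simp [pvCountLead]
    · simp only [List.cons_append, List.all_cons, List.length_cons, Bool.true_and]
      rw [show pvCountLead (true :: (a' ++ b)) = pvCountLead (a' ++ b) + 1 from by
            simp [pvCountLead],
          show pvCountLead (true :: a') = pvCountLead a' + 1 from by simp [pvCountLead], ih]
      split_ifs with h <;> push_cast <;> omega

theorem pvCountLead_allTrue (l : List Bool) (h : l.all (fun x => x)) :
    pvCountLead l = (l.length : Int) := by
  induction l with
  | nil => rfl
  | cons f l' ih =>
    simp only [List.all_cons, Bool.and_eq_true] at h
    simp only [pvCountLead, h.1, if_true, ih h.2, List.length_cons]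
    push_cast; ring

-- A's first loop leaves in tmp exactly the trailing-True streak
theorem pvTmpFinal (l : List Bool) : ∀ (b t : Int),
    (l.foldl pvStepA (b, t)).2 =
      if l.all (fun x => x) then t + (l.length : Int) else pvCountLead l.reverse := by
  induction l with
  | nil => intro b t; simp [pvCountLead]
  | cons f l' ih =>
    intro b t
    cases f
    · simp only [List.foldl_cons, pvStepA, if_false, Bool.false_eq_true, reduceIte, ih,
        List.all_cons, List.reverse_cons, pvCountLead_append, List.all_reverse,
        List.length_reverse, pvCountLead]
      split_ifs <;> simp_all <;> omega
    · simp only [List.foldl_cons, pvStepA, if_true, ih, List.all_cons, List.reverse_cons,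
        pvCountLead_append, List.all_reverse, List.length_reverse, pvCountLead, List.length_cons]
      split_ifs <;> simp_all <;> omega

-- ===== VERDICT (by name: the statement is the Claim_ definition above) =====
theorem calc_streak_py_spec : Claim_equal_calc_streak_py := by
  intro l _
  show calc_streak_py l = calc_streak_py_alt l
  unfold calc_streak_py calc_streak_py_alt
  have hstart : ((0 : Int), (0 : Int)) = (pvM [], pvHeadT []) := rfl
  have hc := pvCouple l []
  rw [hstart, hc]
  set R := l.foldl pvRunStep [] with hR
  have hcur : (match R.reverse.getLast? with
      | some (true, n) => n
      | _ => (0 : Int)) = pvHeadT R := by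
    rw [List.getLast?_reverse]
    match R with
    | [] => rfl
    | (g, n) :: tl => cases g <;> rfl
  have htmp : pvHeadT R = pvCountLead l.reverse := by
    have h2 := pvTmpFinal l 0 0
    rw [hstart, hc] at h2
    simp only at h2
    rw [h2]
    split_ifs with h
    · rw [pvCountLead_allTrue _ (by simpa using h)]
      simp
    · rfl
  simp only [hcur, htmp]
  rw [show List.foldl pvBestStep 0 R.reverse = pvM R.reverse from rfl, pvM_reverse]
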